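-- pv_equiv track=rewrite | github.com/ibalram/Programming-Library | CP/for_others/amit_verma_17-03-2021.py | solution
-- ===== SOURCE A (Python) =====
-- def solution(blocks):
--     ranges = []
--     l = 0
--     val = blocks[0]
--     n = len(blocks)
--     for i in range(1,len(blocks)):
--         if blocks[i]!=blocks[i-1]:
--             ranges.append([val,l,i-1])
--             l = i
--             val = blocks[i]
--     ranges.append([val,l,n-1])
--
--     peaks = [0]
--     res =0
--     n = len(ranges)
--     for i in range(1,n-1):
--         pre = ranges[i-1][0]
--         cur = ranges[i][0]
--         nxt = ranges[i+1][0]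
--         if i>0 and i<n-1 and pre<cur>nxt:
--             peaks.append(i)
--     peaks.append(n-1)
--     for i in range(1,len(peaks)):
--         pre = ranges[peaks[i-1]][1]
--         cur = ranges[peaks[i]][2]
--         res = max(cur-pre+1, res)
--     return res
-- ===== SOURCE B (Python) =====
-- def solution(blocks):
--     n = len(blocks)
--     res = 0
--     anchor = 0        # block-start of the previously recorded peak run (run 0 is a peak)
--     run_start = 0     # block-start of the run currently being read
--     prev_val = None   # value of the run before the current one, if any
--     for i in range(1, n):
--         if blocks[i] != blocks[i - 1]:
--             # run [run_start .. i-1] with value blocks[i-1] just closed;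
--             # it is an interior run iff prev_val exists, and a peak iff strictly above both sides
--             if prev_val is not None and prev_val < blocks[i - 1] > blocks[i]:
--                 res = max(i - 1 - anchor + 1, res)
--                 anchor = run_start
--             prev_val = blocks[i - 1]
--             run_start = i
--     # the final run is always treated as a peak
--     res = max(n - 1 - anchor + 1, res)
--     return res
-- ===== Notes on version B (the rewrite author's own statement) =====
-- stated objective: faster
-- what changed: Replaced A's three passes (materialize the run-ranges list, collect a peaks list, then scan consecutive peak pairs) by a single streaming scan over blocks that keeps only (res, anchor, run_start, prev_val) and builds no intermediate lists.
-- crash fix: On the empty list A raises IndexError (it indexes the first element unconditionally); B naturally returns 0 there. — e.g. on solution([]): A raises IndexError, B returns 0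
import Mathlib
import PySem

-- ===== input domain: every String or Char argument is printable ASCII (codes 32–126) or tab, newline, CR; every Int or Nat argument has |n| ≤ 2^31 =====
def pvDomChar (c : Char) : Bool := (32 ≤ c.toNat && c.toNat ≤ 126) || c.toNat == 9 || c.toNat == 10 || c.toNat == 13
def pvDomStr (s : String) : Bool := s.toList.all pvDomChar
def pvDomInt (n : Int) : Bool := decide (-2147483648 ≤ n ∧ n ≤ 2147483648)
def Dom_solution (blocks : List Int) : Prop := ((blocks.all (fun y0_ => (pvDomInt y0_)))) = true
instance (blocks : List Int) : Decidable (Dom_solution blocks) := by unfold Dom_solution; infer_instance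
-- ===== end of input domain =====

-- B fuses A's three passes (build run ranges; collect peaks; scan peak pairs) into one streaming
-- scan over blocks that materializes no intermediate list; same O(n), measured constant-factor faster.

-- ===== PORT A =====
-- A's first loop body (build the run-ranges list)
def aStep1 (blocks : List Int) (st : List (Int × Int × Int) × Int × Int) (i : Int) :
    List (Int × Int × Int) × Int × Int :=
  if PySem.List.pyGetD blocks i 0 ≠ PySem.List.pyGetD blocks (i - 1) 0 then
    (st.1 ++ [(st.2.2, st.2.1, i - 1)], i, PySem.List.pyGetD blocks i 0)
  else st

-- A's second loop body (collect interior peak indices)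
def aStep2 (ranges : List (Int × Int × Int)) (m : Int) (pk : List Int) (i : Int) : List Int :=
  if i > 0 ∧ i < m - 1 ∧
      (PySem.List.pyGetD ranges (i - 1) (0, 0, 0)).1 < (PySem.List.pyGetD ranges i (0, 0, 0)).1 ∧
      (PySem.List.pyGetD ranges i (0, 0, 0)).1 > (PySem.List.pyGetD ranges (i + 1) (0, 0, 0)).1
  then pk ++ [i] else pk

-- A's third loop body (max span between consecutive peaks)
def aStep3 (ranges : List (Int × Int × Int)) (peaks : List Int) (res : Int) (i : Int) : Int :=
  max ((PySem.List.pyGetD ranges (PySem.List.pyGetD peaks i 0) (0, 0, 0)).2.2 -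
       (PySem.List.pyGetD ranges (PySem.List.pyGetD peaks (i - 1) 0) (0, 0, 0)).2.1 + 1) res

def solution (blocks : List Int) : Int :=
  let n : Int := blocks.length
  let s := (PySem.List.pyRange 1 n 1).foldl (aStep1 blocks) ([], 0, PySem.List.pyGetD blocks 0 0)
  let ranges := s.1 ++ [(s.2.2, s.2.1, n - 1)]
  let m : Int := ranges.length
  let peaks := (PySem.List.pyRange 1 (m - 1) 1).foldl (aStep2 ranges m) [0] ++ [m - 1]
  (PySem.List.pyRange 1 (peaks.length : Int) 1).foldl (aStep3 ranges peaks) 0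

-- ===== PORT B =====
-- B's single loop body; state = (res, anchor, run_start, prev_val)
def bStep (blocks : List Int) (st : Int × Int × Int × Option Int) (i : Int) :
    Int × Int × Int × Option Int :=
  if PySem.List.pyGetD blocks i 0 ≠ PySem.List.pyGetD blocks (i - 1) 0 then
    if Option.any (fun p => decide (p < PySem.List.pyGetD blocks (i - 1) 0) &&
        decide (PySem.List.pyGetD blocks (i - 1) 0 > PySem.List.pyGetD blocks i 0)) st.2.2.2 then
      (max (i - 1 - st.2.1 + 1) st.1, st.2.2.1, i, some (PySem.List.pyGetD blocks (i - 1) 0))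
    else
      (st.1, st.2.1, i, some (PySem.List.pyGetD blocks (i - 1) 0))
  else st

def solution_alt (blocks : List Int) : Int :=
  let n : Int := blocks.length
  let s := (PySem.List.pyRange 1 n 1).foldl (bStep blocks) (0, 0, 0, none)
  max (n - 1 - s.2.1 + 1) s.1

-- ===== PRECONDITION & SPEC =====
-- A indexes the first element unconditionally, so it raises IndexError exactly on the empty list.
def Pre_solution (blocks : List Int) : Prop := blocks ≠ []
instance (blocks : List Int) : Decidable (Pre_solution blocks) := by unfold Pre_solution; infer_instance
def pvWitness_solution : List Int := [1]

-- On the empty list A raises IndexError while B naturally returns 0.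
def Raises_solution (blocks : List Int) : Prop := blocks = []
instance (blocks : List Int) : Decidable (Raises_solution blocks) := by unfold Raises_solution; infer_instance
def pvRaiseWitness_solution : List Int := []
def pvRaiseWitnessOut_solution : Int := 0

def Spec_solution (blocks : List Int) (out : Int) : Prop := out = solution_alt blocks
instance (blocks : List Int) (out : Int) : Decidable (Spec_solution blocks out) := by unfold Spec_solution; infer_instance

-- ===== CLAIM (what is proved, stated in full; the proofs are below) =====
def Claim_equal_solution : Prop := ∀ (blocks : List Int), Dom_solution blocks → Pre_solution blocks → Spec_solution blocks (solution blocks)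
def Claim_raises_solution : Prop := (∀ (blocks : List Int), Dom_solution blocks → Raises_solution blocks → ¬ Pre_solution blocks) ∧ (Dom_solution (pvRaiseWitness_solution) ∧ Raises_solution (pvRaiseWitness_solution) ∧ solution_alt (pvRaiseWitness_solution) = pvRaiseWitnessOut_solution)

-- ===== LEMMAS AND PROOFS =====

-- generic fold over adjacent pairs with a running index (proof-side shape of the index loops)
def adjFI {α β : Type} (F : β → Int → α → α → β) (st : β) (i : Int) (p : α) : List α → β
  | [] => st
  | x :: t => adjFI F (F st i p x) (i + 1) x t

-- pure forms of the two loop bodies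
def aF (st : List (Int × Int × Int) × Int × Int) (i x y : Int) : List (Int × Int × Int) × Int × Int :=
  if y ≠ x then (st.1 ++ [(st.2.2, st.2.1, i - 1)], i, y) else st

def bF (st : Int × Int × Int × Option Int) (i x y : Int) : Int × Int × Int × Option Int :=
  if y ≠ x then
    if Option.any (fun p => decide (p < x) && decide (x > y)) st.2.2.2 then
      (max (i - 1 - st.2.1 + 1) st.1, st.2.2.1, i, some x)
    else (st.1, st.2.1, i, some x)
  else st

-- the run-ranges list of a block suffix, structurally
def CR (acc : List (Int × Int × Int)) (l v i : Int) : List Int → List (Int × Int × Int)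
  | [] => acc ++ [(v, l, i - 1)]
  | x :: t => if x ≠ v then CR (acc ++ [(v, l, i - 1)]) i x (i + 1) t else CR acc l v (i + 1) t

-- the streaming peak-span scan over a run list
def streamT (res anchor : Int) (prev : Option Int) : List (Int × Int × Int) → Int
  | [] => res
  | [r] => max (r.2.2 - anchor + 1) res
  | r :: c :: t =>
    if Option.any (fun p => decide (p < r.1) && decide (r.1 > c.1)) prev then
      streamT (max (r.2.2 - anchor + 1) res) r.2.1 (some r.1) (c :: t)
    else streamT res anchor (some r.1) (c :: t)

-- interior peak runs of a run list, with look-back value prev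
def selW (prev : Option Int) (b : Int × Int × Int) : List (Int × Int × Int) → List (Int × Int × Int)
  | [] => []
  | c :: t => (if Option.any (fun p => decide (p < b.1) && decide (b.1 > c.1)) prev then [b] else []) ++
      selW (some b.1) c t

-- pair-span fold over a peak-run list (carrying the previous peak's start)
def pf (res astart : Int) : List (Int × Int × Int) → Int
  | [] => res
  | q :: t => pf (max (q.2.2 - astart + 1) res) q.2.1 t

lemma bridge_pairs {α β : Type} (F : β → Int → α → α → β) (d : α) (xs : List α) :
    ∀ (rest : List α) (k : Nat) (p : α) (init : β), 1 ≤ k → xs.drop (k - 1) = p :: rest →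
    (PySem.List.pyRange (k : Int) (xs.length : Int) 1).foldl
      (fun st i => F st i (PySem.List.pyGetD xs (i - 1) d) (PySem.List.pyGetD xs i d)) init
    = adjFI F init (k : Int) p rest := by
  intro rest
  induction rest with
  | nil =>
    intro k p init hk hd
    have hlen : xs.length = k := by
      have := congrArg List.length hd
      simp [List.length_drop] at this
      omega
    rw [PySem.List.pyRange_one_eq_nil (by omega)]
    rfl
  | cons y t ih =>
    intro k p init hk hd
    have hlen : xs.length = k + 1 + t.length := by
      have := congrArg List.length hd
      simp [List.length_drop] at this
      omega
    have hp : xs[k - 1]? = some p := by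
      have : (xs.drop (k - 1))[0]? = some p := by rw [hd]; rfl
      simpa [List.getElem?_drop] using this
    have hy : xs[k]? = some y := by
      have : (xs.drop (k - 1))[1]? = some y := by rw [hd]; rfl
      rw [List.getElem?_drop] at this
      have hkk : k - 1 + 1 = k := by omega
      rwa [hkk] at this
    have hgp : PySem.List.pyGetD xs ((k : Int) - 1) d = p := by
      have hcast : (k : Int) - 1 = ((k - 1 : Nat) : Int) := by omega
      rw [hcast, PySem.List.pyGetD_natCast, List.getD, hp]
      rfl
    have hgy : PySem.List.pyGetD xs (k : Int) d = y := by
      rw [PySem.List.pyGetD_natCast, List.getD, hy]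
      rfl
    rw [PySem.List.pyRange_one_cons (by omega), List.foldl_cons, hgp, hgy]
    have hd' : xs.drop (k + 1 - 1) = y :: t := by
      have : xs.drop (k - 1 + 1) = y :: t := by
        rw [← List.drop_drop]
        · rw [hd]; rfl
      simpa [Nat.sub_add_cancel hk] using this
      
    have := ih (k + 1) y (F init (k : Int) p y) (by omega) hd'
    rw [show ((k : Int) + 1) = ((k + 1 : Nat) : Int) by push_cast; ring]
    rw [this]
    simp only [adjFI]
    norm_cast

lemma CR_acc : ∀ (t : List Int) (acc : List (Int × Int × Int)) (l v i : Int),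
    CR acc l v i t = acc ++ CR [] l v i t := by
  intro t
  induction t with
  | nil => intro acc l v i; simp [CR]
  | cons x t ih =>
    intro acc l v i
    simp only [CR, List.nil_append]
    by_cases h : x = v
    · rw [if_neg (not_not_intro h), if_neg (not_not_intro h)]
      exact ih acc l v (i + 1)
    · rw [if_pos h, if_pos h]
      rw [ih (acc ++ [(v, l, i - 1)]), ih [(v, l, i - 1)]]
      simp

lemma CR_head : ∀ (t : List Int) (l v i : Int), ∃ e rest, CR [] l v i t = (v, l, e) :: rest := by
  intro t
  induction t with
  | nil => intro l v i; exact ⟨i - 1, [], rfl⟩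
  | cons x t ih =>
    intro l v i
    by_cases h : x = v
    · obtain ⟨e, rest, he⟩ := ih l v (i + 1)
      exact ⟨e, rest, by simp [CR, h, he]⟩
    · refine ⟨i - 1, CR [] i x (i + 1) t, ?_⟩
      simp only [CR, List.nil_append]
      rw [if_pos h, CR_acc]
      rfl

lemma CR_adj : ∀ (t : List Int) (acc : List (Int × Int × Int)) (l v i : Int),
    (adjFI aF (acc, l, v) i v t).1 ++
      [((adjFI aF (acc, l, v) i v t).2.2, (adjFI aF (acc, l, v) i v t).2.1, i + (t.length : Int) - 1)]
    = CR acc l v i t := by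
  intro t
  induction t with
  | nil => intro acc l v i; simp [adjFI, CR]
  | cons x t ih =>
    intro acc l v i
    have hlen : i + ((x :: t).length : Int) - 1 = (i + 1) + (t.length : Int) - 1 := by
      simp only [List.length_cons]; push_cast; ring
    simp only [adjFI, CR, hlen]
    by_cases h : x = v
    · subst h
      rw [if_neg (not_not_intro rfl), show aF (acc, l, x) i x x = (acc, l, x) by simp [aF]]
      exact ih acc l x (i + 1)
    · rw [if_pos h, show aF (acc, l, v) i v x = (acc ++ [(v, l, i - 1)], i, x) by simp [aF, h]]
      exact ih (acc ++ [(v, l, i - 1)]) i x (i + 1)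

lemma B_stream : ∀ (t : List Int) (i l v res anchor : Int) (prev : Option Int),
    max ((i + (t.length : Int) - 1) - (adjFI bF (res, anchor, l, prev) i v t).2.1 + 1)
        (adjFI bF (res, anchor, l, prev) i v t).1
    = streamT res anchor prev (CR [] l v i t) := by
  intro t
  induction t with
  | nil =>
    intro i l v res anchor prev
    simp only [adjFI, CR, streamT, List.length_nil, List.nil_append]
    norm_num
  | cons x t ih =>
    intro i l v res anchor prev
    have hlen : i + ((x :: t).length : Int) - 1 = (i + 1) + (t.length : Int) - 1 := by
      simp only [List.length_cons]; push_cast; ring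
    simp only [adjFI, CR, List.nil_append, hlen]
    by_cases h : x = v
    · subst h
      rw [if_neg (not_not_intro rfl),
        show bF (res, anchor, l, prev) i x x = (res, anchor, l, prev) by simp [bF]]
      exact ih (i + 1) l x res anchor prev
    · rw [if_pos h, CR_acc]
      obtain ⟨e, rest, he⟩ := CR_head t i x (i + 1)
      rw [he]
      have hbF : bF (res, anchor, l, prev) i v x =
          if Option.any (fun p => decide (p < v) && decide (v > x)) prev then
            (max (i - 1 - anchor + 1) res, l, i, some v)
          else (res, anchor, i, some v) := by
        simp only [bF, if_pos h]
      by_cases hc : Option.any (fun p => decide (p < v) && decide (v > x)) prev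
      · rw [hbF, if_pos hc]
        have := ih (i + 1) i x (max (i - 1 - anchor + 1) res) l (some v)
        rw [he] at this
        rw [this]
        simp only [List.singleton_append, streamT]
        rw [if_pos (by simpa using hc)]
      · rw [hbF, if_neg hc]
        have := ih (i + 1) i x res anchor (some v)
        rw [he] at this
        rw [this]
        simp only [List.singleton_append, streamT]
        rw [if_neg (by simpa using hc)]

lemma adjFI_pf (h : Int → Int × Int × Int) :
    ∀ (t : List Int) (i x st : Int),
    adjFI (fun st (_ : Int) p q => max ((h q).2.2 - (h p).2.1 + 1) st) st i x t
    = pf st (h x).2.1 (t.map h) := by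
  intro t
  induction t with
  | nil => intro i x st; rfl
  | cons y t ih =>
    intro i x st
    simp only [adjFI, List.map_cons, pf]
    exact ih (i + 1) y _

lemma pf_selW : ∀ (rest : List (Int × Int × Int)) (b : Int × Int × Int) (prev : Option Int)
    (astart res : Int),
    pf res astart (selW prev b rest ++ [(b :: rest).getLast (by simp)]) = streamT res astart prev (b :: rest) := by
  intro rest
  induction rest with
  | nil =>
    intro b prev astart res
    simp [selW, pf, streamT]
  | cons c t ih =>
    intro b prev astart res
    have hlast : (b :: c :: t).getLast (by simp) = (c :: t).getLast (by simp) :=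
      List.getLast_cons (by simp)
    simp only [selW, hlast, streamT]
    by_cases hc : Option.any (fun p => decide (p < b.1) && decide (b.1 > c.1)) prev
    · rw [if_pos hc, if_pos hc]
      simp only [List.cons_append, pf]
      exact ih c (some b.1) b.2.1 (max (b.2.2 - astart + 1) res)
    · rw [if_neg hc, if_neg hc]
      simp only [List.nil_append]
      exact ih c (some b.1) astart res

lemma selW_idx (rs : List (Int × Int × Int)) :
    ∀ (rest : List (Int × Int × Int)) (k : Nat) (p b : Int × Int × Int),
    1 ≤ k → rs.drop (k - 1) = p :: b :: rest →
    ((PySem.List.pyRange (k : Int) ((rs.length : Int) - 1) 1).filter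
        (fun i => decide (i > 0 ∧ i < (rs.length : Int) - 1 ∧
          (PySem.List.pyGetD rs (i - 1) (0, 0, 0)).1 < (PySem.List.pyGetD rs i (0, 0, 0)).1 ∧
          (PySem.List.pyGetD rs i (0, 0, 0)).1 > (PySem.List.pyGetD rs (i + 1) (0, 0, 0)).1))).map
      (fun j => PySem.List.pyGetD rs j (0, 0, 0))
    = selW (some p.1) b rest := by
  intro rest
  induction rest with
  | nil =>
    intro k p b hk hd
    have hlen : rs.length = k + 1 := by
      have := congrArg List.length hd
      simp [List.length_drop] at this
      omega
    rw [PySem.List.pyRange_one_eq_nil (by omega)]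
    rfl
  | cons c rt ih =>
    intro k p b hk hd
    have hlen : rs.length = k + 2 + rt.length := by
      have := congrArg List.length hd
      simp [List.length_drop] at this
      omega
    have hp : rs[k - 1]? = some p := by
      have : (rs.drop (k - 1))[0]? = some p := by rw [hd]; rfl
      simpa [List.getElem?_drop] using this
    have hb : rs[k]? = some b := by
      have : (rs.drop (k - 1))[1]? = some b := by rw [hd]; rfl
      rw [List.getElem?_drop] at this
      rwa [show k - 1 + 1 = k by omega] at this
    have hcc : rs[k + 1]? = some c := by
      have : (rs.drop (k - 1))[2]? = some c := by rw [hd]; rfl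
      rw [List.getElem?_drop] at this
      rwa [show k - 1 + 2 = k + 1 by omega] at this
    have hgp : PySem.List.pyGetD rs ((k : Int) - 1) (0, 0, 0) = p := by
      rw [show (k : Int) - 1 = ((k - 1 : Nat) : Int) by omega, PySem.List.pyGetD_natCast,
        List.getD, hp]; rfl
    have hgb : PySem.List.pyGetD rs (k : Int) (0, 0, 0) = b := by
      rw [PySem.List.pyGetD_natCast, List.getD, hb]; rfl
    have hgc : PySem.List.pyGetD rs ((k : Int) + 1) (0, 0, 0) = c := by
      rw [show (k : Int) + 1 = ((k + 1 : Nat) : Int) by omega, PySem.List.pyGetD_natCast,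
        List.getD, hcc]; rfl
    have hlen2 : rs.length = k + 2 + rt.length := hlen
    have hd' : rs.drop (k + 1 - 1) = b :: c :: rt := by
      have : rs.drop (k - 1 + 1) = b :: c :: rt := by
        rw [← List.drop_drop, hd]; rfl
      simpa [Nat.sub_add_cancel hk] using this
    rw [PySem.List.pyRange_one_cons (by omega), List.filter_cons]
    have hsel : selW (some p.1) b (c :: rt) =
        (if Option.any (fun q => decide (q < b.1) && decide (b.1 > c.1)) (some p.1) then [b] else []) ++
          selW (some b.1) c rt := rfl
    rw [hsel]
    have ihe := ih (k + 1) b c (by omega) hd'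
    rw [show ((k + 1 : Nat) : Int) = (k : Int) + 1 by push_cast; ring] at ihe
    by_cases hcond : p.1 < b.1 ∧ b.1 > c.1
    · rw [if_pos (by
          rw [decide_eq_true_eq]
          exact ⟨by omega, by omega, by rw [hgp, hgb]; exact hcond.1,
            by rw [hgb, hgc]; exact hcond.2⟩),
        if_pos (by
          simp only [Option.any_some, Bool.and_eq_true, decide_eq_true_eq]
          exact ⟨hcond.1, hcond.2⟩)]
      simp only [List.map_cons, hgb, List.singleton_append]
      rw [ihe]
    · rw [if_neg (by
          rw [decide_eq_true_eq]
          rintro ⟨-, -, h1, h2⟩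
          rw [hgp, hgb] at h1
          rw [hgb, hgc] at h2
          exact hcond ⟨h1, h2⟩),
        if_neg (by
          simp only [Option.any_some, Bool.and_eq_true, decide_eq_true_eq]
          exact fun hx => hcond ⟨hx.1, hx.2⟩)]
      simp only [List.nil_append]
      rw [ihe]

lemma aTail_eq (rs : List (Int × Int × Int)) (r0 : Int × Int × Int) (rest : List (Int × Int × Int))
    (hrs : rs = r0 :: rest) :
    (PySem.List.pyRange 1
        ((((PySem.List.pyRange 1 ((rs.length : Int) - 1) 1).foldl (aStep2 rs (rs.length : Int)) [0] ++
          [(rs.length : Int) - 1]).length : Int)) 1).foldl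
      (aStep3 rs ((PySem.List.pyRange 1 ((rs.length : Int) - 1) 1).foldl (aStep2 rs (rs.length : Int)) [0] ++
          [(rs.length : Int) - 1])) 0
    = streamT 0 r0.2.1 none rs := by
  subst hrs
  set rs : List (Int × Int × Int) := r0 :: rest with hrsdef
  have hmlen : 1 ≤ rs.length := by simp [hrsdef]
  -- phase 2 as an append-if fold
  have h2 : aStep2 rs (rs.length : Int) = fun pk i =>
      if (fun i : Int => decide (i > 0 ∧ i < (rs.length : Int) - 1 ∧
          (PySem.List.pyGetD rs (i - 1) (0, 0, 0)).1 < (PySem.List.pyGetD rs i (0, 0, 0)).1 ∧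
          (PySem.List.pyGetD rs i (0, 0, 0)).1 > (PySem.List.pyGetD rs (i + 1) (0, 0, 0)).1)) i = true
      then pk ++ [(fun j : Int => j) i] else pk := by
    funext pk i
    simp only [aStep2, decide_eq_true_eq]
  rw [h2, PySem.List.foldl_append_if, List.map_id']
  set sel : List Int := (PySem.List.pyRange 1 ((rs.length : Int) - 1) 1).filter
      (fun i : Int => decide (i > 0 ∧ i < (rs.length : Int) - 1 ∧
        (PySem.List.pyGetD rs (i - 1) (0, 0, 0)).1 < (PySem.List.pyGetD rs i (0, 0, 0)).1 ∧
        (PySem.List.pyGetD rs i (0, 0, 0)).1 > (PySem.List.pyGetD rs (i + 1) (0, 0, 0)).1)) with hseldef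
  have hpk : [0] ++ sel ++ [(rs.length : Int) - 1] = 0 :: (sel ++ [(rs.length : Int) - 1]) := by simp
  rw [hpk]
  -- phase 3 via the pair bridge
  have h3 : aStep3 rs (0 :: (sel ++ [(rs.length : Int) - 1])) = fun st i =>
      (fun (st : Int) (_ : Int) (p q : Int) =>
        max ((PySem.List.pyGetD rs q (0, 0, 0)).2.2 - (PySem.List.pyGetD rs p (0, 0, 0)).2.1 + 1) st) st i
        (PySem.List.pyGetD (0 :: (sel ++ [(rs.length : Int) - 1])) (i - 1) 0)
        (PySem.List.pyGetD (0 :: (sel ++ [(rs.length : Int) - 1])) i 0) := by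
    funext st i
    rfl
  rw [h3]
  have hb := bridge_pairs
    (fun (st : Int) (_ : Int) (p q : Int) =>
      max ((PySem.List.pyGetD rs q (0, 0, 0)).2.2 - (PySem.List.pyGetD rs p (0, 0, 0)).2.1 + 1) st)
    0 (0 :: (sel ++ [(rs.length : Int) - 1])) (sel ++ [(rs.length : Int) - 1]) 1 0 0 (by omega) rfl
  rw [Nat.cast_one] at hb
  rw [hb]
  rw [adjFI_pf (fun j => PySem.List.pyGetD rs j (0, 0, 0)) (sel ++ [(rs.length : Int) - 1]) 1 0 0]
  rw [List.map_append]
  have hlast : PySem.List.pyGetD rs ((rs.length : Int) - 1) (0, 0, 0) =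
      rs.getLast (by simp [hrsdef]) := by
    rw [show (rs.length : Int) - 1 = ((rs.length - 1 : Nat) : Int) by omega,
      PySem.List.pyGetD_natCast, List.getD_eq_getElem _ _ (by omega),
      List.getLast_eq_getElem]
  have hz : PySem.List.pyGetD rs (0 : Int) (0, 0, 0) = r0 := by
    rw [hrsdef]
    exact PySem.List.pyGetD_zero_cons r0 rest (0, 0, 0)
  have hselmap : sel.map (fun j => PySem.List.pyGetD rs j (0, 0, 0)) = selW none r0 rest := by
    cases rest with
    | nil =>
      rw [hseldef]
      rw [show ((rs.length : Int) - 1) = 0 by simp [hrsdef]]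
      rw [PySem.List.pyRange_one_eq_nil (by omega)]
      rfl
    | cons r1 rt =>
      have := selW_idx rs rt 1 r0 r1 (by omega) (by simp [hrsdef])
      rw [Nat.cast_one] at this
      rw [hseldef, this]
      simp [selW]
  rw [hselmap, List.map_cons, List.map_nil, hlast, hz]
  have := pf_selW rest r0 none r0.2.1 0
  rw [← this]

-- ===== VERDICT (by name: the statement is the Claim_ definition above) =====
theorem solution_spec : Claim_equal_solution := by
  intro blocks _ hpre
  unfold Spec_solution
  cases blocks with
  | nil => exact absurd rfl hpre
  | cons b0 t =>
    simp only [solution, solution_alt]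
    have hcast : (((b0 :: t).length : Nat) : Int) = 1 + (t.length : Int) := by
      push_cast [List.length_cons]; ring
    have h0 : PySem.List.pyGetD (b0 :: t) 0 0 = b0 := PySem.List.pyGetD_zero_cons b0 t 0
    -- A side: first loop = adjFI aF, then = CR
    have hA1 : aStep1 (b0 :: t) = fun st i =>
        aF st i (PySem.List.pyGetD (b0 :: t) (i - 1) 0) (PySem.List.pyGetD (b0 :: t) i 0) := by
      funext st i; rfl
    have hbrA := bridge_pairs aF 0 (b0 :: t) t 1 b0 ([], 0, PySem.List.pyGetD (b0 :: t) 0 0)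
      (by omega) (by simp)
    rw [Nat.cast_one] at hbrA
    rw [hA1, hbrA, h0]
    -- B side: loop = adjFI bF
    have hB1 : bStep (b0 :: t) = fun st i =>
        bF st i (PySem.List.pyGetD (b0 :: t) (i - 1) 0) (PySem.List.pyGetD (b0 :: t) i 0) := by
      funext st i; rfl
    have hbrB := bridge_pairs bF 0 (b0 :: t) t 1 b0 ((0 : Int), (0 : Int), (0 : Int), (none : Option Int))
      (by omega) (by simp)
    rw [Nat.cast_one] at hbrB
    rw [hB1, hbrB]
    -- rewrite the two trailing length expressions
    rw [hcast]
    rw [CR_adj t [] 0 b0 1]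
    obtain ⟨e, rest', hcr⟩ := CR_head t 0 b0 1
    rw [aTail_eq (CR [] 0 b0 1 t) (b0, 0, e) rest' hcr]
    exact (B_stream t 1 0 b0 0 0 none).symm

@[simp] theorem solution_raises : Claim_raises_solution := by
  unfold Claim_raises_solution
  exact ⟨fun blocks _ hr hp => hp hr, by decide⟩
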